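-- pv_equiv track=rewrite | github.com/yilinzhang130/BDGO | api/services/document/rnpv/references.py | _auto_collect_references
-- ===== SOURCE A (Python) =====
-- def _auto_collect_references(config):
--     """Build a de-duped reference list from each indication's data_sources map."""
--     refs = []
--     seen = set()
--     for ind in config.get("indications", []):
--         for _, src in ind.get("data_sources", {}).items():
--             if src and src not in seen:
--                 seen.add(src)
--                 refs.append(
--                     {
--                         "id": f"R{len(refs) + 1}",
--                         "category": "Input",
--                         "description": src,
--                         "type": "Various",
--                         "date": "",
--                         "url": "",
--                     }
--                 )
--     return refs
-- ===== SOURCE B (Python) =====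
-- def _auto_collect_references(config):
--     """Build a de-duped reference list from each indication's data_sources map."""
--     srcs = [src
--             for ind in config.get("indications", [])
--             for src in ind.get("data_sources", {}).values()
--             if src]
--
--     def nub(xs):
--         # keep the head, recursively nub the tail with the head's duplicates removed
--         if not xs:
--             return []
--         head = xs[0]
--         return [head] + nub([y for y in xs[1:] if y != head])
--
--     return [
--         {
--             "id": f"R{i}",
--             "category": "Input",
--             "description": src,
--             "type": "Various",
--             "date": "",
--             "url": "",
--         }
--         for i, src in enumerate(nub(srcs), 1)
--     ]
-- ===== Notes on version B (the rewrite author's own statement) =====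
-- stated objective: alternative
-- what changed: Replaces A's interleaved loop with a seen-set by flattening the truthy sources once and de-duplicating them with a recursive nub that keeps each head and filters its duplicates out of the tail (no auxiliary set at all), then building the rows by enumerate; trades A's O(n) set lookups for an O(n^2) filter recursion.
import Mathlib
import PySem

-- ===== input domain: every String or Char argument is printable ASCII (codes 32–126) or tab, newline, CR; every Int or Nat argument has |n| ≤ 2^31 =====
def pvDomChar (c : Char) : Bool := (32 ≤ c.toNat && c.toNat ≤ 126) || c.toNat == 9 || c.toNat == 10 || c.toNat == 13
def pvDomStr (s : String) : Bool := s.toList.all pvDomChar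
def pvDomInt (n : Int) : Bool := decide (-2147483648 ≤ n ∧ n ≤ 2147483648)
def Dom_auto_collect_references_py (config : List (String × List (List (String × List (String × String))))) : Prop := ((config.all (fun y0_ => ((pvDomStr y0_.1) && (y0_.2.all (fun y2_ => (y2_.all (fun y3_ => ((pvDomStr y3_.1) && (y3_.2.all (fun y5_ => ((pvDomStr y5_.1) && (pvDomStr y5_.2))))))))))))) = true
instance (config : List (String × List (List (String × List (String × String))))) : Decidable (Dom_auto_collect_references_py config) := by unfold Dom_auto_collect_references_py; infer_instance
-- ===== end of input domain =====

-- B flattens the truthy sources, de-dups them with a recursive nub (keep head, filter its duplicates from the tail; no seen-set), then enumerates rows; an alternative decomposition, not faster.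


-- ===== PORT A =====
def auto_collect_references_py (config : List (String × List (List (String × List (String × String))))) : List (List (String × String)) :=
  let st :=
    ((config.lookup "indications").getD []).foldl
      (fun (st : List (List (String × String)) × PySem.Set String) ind =>
        ((ind.lookup "data_sources").getD []).foldl
          (fun (st : List (List (String × String)) × PySem.Set String) kv =>
            let src := kv.2
            if (src != "") && !(PySem.Set.contains st.2 src) then
              (st.1 ++ [[("id", "R" ++ PySem.Int.toStr ((st.1.length : Int) + 1)),
                         ("category", "Input"), ("description", src),
                         ("type", "Various"), ("date", ""), ("url", "")]],
               PySem.Set.add st.2 src)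
            else st) st)
      ([], PySem.Set.empty)
  st.1

-- ===== PORT B =====
/-- B's recursive nub: keep the head, drop its duplicates from the tail, recurse. -/
def pvNub : List String → List String
  | [] => []
  | x :: rest => x :: pvNub (rest.filter (fun y => y != x))
termination_by xs => xs.length
decreasing_by
  calc (List.filter _ rest.attach).unattach.length
      ≤ rest.attach.unattach.length := by
        simp only [List.length_unattach]; exact List.length_filter_le _ _
    _ < rest.length + 1 := by simp

def auto_collect_references_py_alt (config : List (String × List (List (String × List (String × String))))) : List (List (String × String)) :=
  let srcs :=
    ((config.lookup "indications").getD []).flatMap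
      (fun ind => (((ind.lookup "data_sources").getD []).map (fun kv => kv.2)).filter (fun s => s != ""))
  (PySem.List.enumerate (pvNub srcs) 1).map (fun p =>
    [("id", "R" ++ PySem.Int.toStr p.1), ("category", "Input"), ("description", p.2),
     ("type", "Various"), ("date", ""), ("url", "")])

-- ===== PRECONDITION & SPEC =====
def Spec_auto_collect_references_py (config : List (String × List (List (String × List (String × String))))) (out : List (List (String × String))) : Prop := out = auto_collect_references_py_alt config
instance (config : List (String × List (List (String × List (String × String))))) (out : List (List (String × String))) : Decidable (Spec_auto_collect_references_py config out) := by unfold Spec_auto_collect_references_py; infer_instance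

-- ===== CLAIM (what is proved, stated in full; the proofs are below) =====
def Claim_equal_auto_collect_references_py : Prop := ∀ (config : List (String × List (List (String × List (String × String))))), Dom_auto_collect_references_py config → Spec_auto_collect_references_py config (auto_collect_references_py config)

-- ===== LEMMAS AND PROOFS =====

/-- One reference row. -/
def pvRow (i : Int) (src : String) : List (String × String) :=
  [("id", "R" ++ PySem.Int.toStr i), ("category", "Input"), ("description", src),
   ("type", "Various"), ("date", ""), ("url", "")]

/-- The rows built from an ordered list of distinct sources. -/
def pvMkRefs (s : List String) : List (List (String × String)) :=
  (PySem.List.enumerate s 1).map (fun p => pvRow p.1 p.2)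

/-- A's loop body, as a function of the source string. -/
def pvStep (st : List (List (String × String)) × PySem.Set String) (src : String) :
    List (List (String × String)) × PySem.Set String :=
  if (src != "") && !(PySem.Set.contains st.2 src) then
    (st.1 ++ [[("id", "R" ++ PySem.Int.toStr ((st.1.length : Int) + 1)),
               ("category", "Input"), ("description", src),
               ("type", "Various"), ("date", ""), ("url", "")]],
     PySem.Set.add st.2 src)
  else st

lemma pvMkRefs_length (s : List String) : (pvMkRefs s).length = s.length := by
  simp [pvMkRefs, PySem.List.length_enumerate]

lemma pvMkRefs_append (s : List String) (x : String) :
    pvMkRefs (s ++ [x]) = pvMkRefs s ++ [pvRow ((s.length : Int) + 1) x] := by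
  simp [pvMkRefs, PySem.List.enumerate_append, PySem.List.enumerate_cons,
        PySem.List.enumerate_nil, Int.add_comm]

lemma pvFoldl_flatMap {α β σ : Type} (f : α → List β) (g : σ → β → σ) (l : List α) (init : σ) :
    (l.flatMap f).foldl g init = l.foldl (fun st x => (f x).foldl g st) init := by
  induction l generalizing init with
  | nil => rfl
  | cons a l ih => simp [List.flatMap_cons, List.foldl_append, ih]

/-- Loop invariant: folding A's step from a state determined by the seen list ends in a
    state determined by the updated seen list. -/
lemma pvStep_inv (xs : List String) (s : PySem.Set String) :
    xs.foldl pvStep (pvMkRefs s, s) =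
      (pvMkRefs ((xs.filter (fun x => x != "")).foldl PySem.Set.add s),
       (xs.filter (fun x => x != "")).foldl PySem.Set.add s) := by
  induction xs generalizing s with
  | nil => rfl
  | cons src xs ih =>
    rw [List.foldl_cons, List.filter_cons]
    by_cases hsrc : src = ""
    · subst hsrc
      simpa [pvStep] using ih s
    · have h : (src != "") = true := by simp [hsrc]
      rw [if_pos h, List.foldl_cons]
      by_cases hm : src ∈ s
      · have hadd : PySem.Set.add s src = s := by simp [PySem.Set.add, hm]
        have hstep : pvStep (pvMkRefs s, s) src = (pvMkRefs s, s) := by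
          simp [pvStep, h, hm]
        rw [hstep, hadd]
        exact ih s
      · have hadd : PySem.Set.add s src = s ++ [src] := by simp [PySem.Set.add, hm]
        have hstep : pvStep (pvMkRefs s, s) src = (pvMkRefs (s ++ [src]), s ++ [src]) := by
          simp [pvStep, h, hm, pvMkRefs_append, pvRow, pvMkRefs_length]
        rw [hstep, hadd]
        exact ih (s ++ [src])

lemma pvNub_nil : pvNub [] = [] := by simp [pvNub]

lemma pvNub_cons (x : String) (rest : List String) :
    pvNub (x :: rest) = x :: pvNub (rest.filter (fun y => y != x)) := by
  simp [pvNub]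

/-- A's seen-set fold computes B's recursive nub: folding Set.add from seen list s
    appends exactly the nub of the not-yet-seen elements. -/
lemma pvFoldl_add_eq_nub (xs : List String) (s : List String) :
    xs.foldl PySem.Set.add s = s ++ pvNub (xs.filter (fun x => !(s.contains x))) := by
  induction xs generalizing s with
  | nil => simp [pvNub_nil]
  | cons x xs ih =>
    rw [List.foldl_cons, List.filter_cons]
    by_cases hm : x ∈ s
    · have hadd : PySem.Set.add s x = s := by simp [PySem.Set.add, hm]
      have hc : (!(s.contains x)) = false := by simp [hm]
      rw [hadd, hc, if_neg (by simp)]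
      exact ih s
    · have hadd : PySem.Set.add s x = s ++ [x] := by simp [PySem.Set.add, hm]
      have hc : (!(s.contains x)) = true := by simp [hm]
      rw [hadd, hc, if_pos rfl, ih (s ++ [x]), pvNub_cons]
      have hfilter : (xs.filter (fun y => !((s ++ [x]).contains y))) =
          (xs.filter (fun y => !(s.contains y))).filter (fun y => y != x) := by
        rw [List.filter_filter]
        apply List.filter_congr
        intro y _
        by_cases hy : y = x <;> by_cases hys : y ∈ s <;> simp [hy, hys]
      rw [hfilter]
      simp

-- ===== VERDICT (by name: the statement is the Claim_ definition above) =====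
theorem auto_collect_references_py_spec : Claim_equal_auto_collect_references_py := by
  intro config _
  unfold Spec_auto_collect_references_py auto_collect_references_py auto_collect_references_py_alt
  set inds := (config.lookup "indications").getD [] with hinds
  set srcsOf := fun (ind : List (String × List (String × String))) =>
      ((ind.lookup "data_sources").getD []).map (fun kv => kv.2) with hsrcsOf
  -- A's nested loop is a fold of pvStep over the flattened source list
  have hA : (inds.foldl
      (fun (st : List (List (String × String)) × PySem.Set String) ind =>
        ((ind.lookup "data_sources").getD []).foldl
          (fun (st : List (List (String × String)) × PySem.Set String) kv =>
            let src := kv.2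
            if (src != "") && !(PySem.Set.contains st.2 src) then
              (st.1 ++ [[("id", "R" ++ PySem.Int.toStr ((st.1.length : Int) + 1)),
                         ("category", "Input"), ("description", src),
                         ("type", "Various"), ("date", ""), ("url", "")]],
               PySem.Set.add st.2 src)
            else st) st)
      ([], PySem.Set.empty)) =
      (inds.flatMap srcsOf).foldl pvStep ([], PySem.Set.empty) := by
    rw [pvFoldl_flatMap]
    simp only [hsrcsOf, List.foldl_map]
    rfl
  rw [hA]
  have hempty : ([] : List (List (String × String))) = pvMkRefs PySem.Set.empty := rfl
  rw [hempty, pvStep_inv]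
  have hfilter : (inds.flatMap srcsOf).filter (fun x => x != "") =
      inds.flatMap (fun ind => (srcsOf ind).filter (fun s => s != "")) := by
    simp [List.filter_flatMap]
  have hfold := pvFoldl_add_eq_nub ((inds.flatMap srcsOf).filter (fun x => x != "")) []
  simp only [PySem.Set.empty, List.nil_append] at hfold ⊢
  rw [hfold]
  have : ((inds.flatMap srcsOf).filter (fun x => x != "")).filter
      (fun x => !(([] : List String).contains x)) =
      (inds.flatMap srcsOf).filter (fun x => x != "") := by
    simp
  rw [this, hfilter]
  rfl
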